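-- pv_equiv track=rewrite | github.com/depuf/ciphr | code/vig_bruteforce.py | letter_groups
-- ===== SOURCE A (Python) =====
-- def letter_groups(keys,text):
--     cleaned_text = ''.join([char for char in text if char.isalpha()])
--     key = keys[0]
--     groupings = ['' for _ in range(key)]
--     for i,letter in enumerate(cleaned_text):
--         group = i % int(key)
--         groupings[group] += cleaned_text[i]
--     return groupings
-- ===== SOURCE B (Python) =====
-- def letter_groups(keys, text):
--     cleaned_text = ''.join([char for char in text if char.isalpha()])
--     key = keys[0]
--     return [cleaned_text[g::int(key)] for g in range(key)]
-- ===== Notes on version B (the rewrite author's own statement) =====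
-- stated objective: idiomatic
-- what changed: Instead of one distributive pass that appends each letter to group i%key via index arithmetic and in-place list mutation, B builds each group directly with one strided slice cleaned_text[g::key] per group.
import Mathlib
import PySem

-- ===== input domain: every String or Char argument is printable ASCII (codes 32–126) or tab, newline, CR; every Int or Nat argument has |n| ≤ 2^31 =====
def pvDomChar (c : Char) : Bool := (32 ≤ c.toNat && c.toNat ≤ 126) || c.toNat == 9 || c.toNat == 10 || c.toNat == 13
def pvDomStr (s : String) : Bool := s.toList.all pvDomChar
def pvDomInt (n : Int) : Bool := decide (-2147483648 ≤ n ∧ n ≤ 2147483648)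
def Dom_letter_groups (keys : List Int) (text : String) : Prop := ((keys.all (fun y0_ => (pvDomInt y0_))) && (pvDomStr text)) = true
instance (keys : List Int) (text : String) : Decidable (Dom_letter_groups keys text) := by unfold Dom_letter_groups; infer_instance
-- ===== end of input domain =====

-- B replaces A's single distributive pass (append letter i to group i % key) by one strided
-- slice cleaned_text[g::key] per group — more idiomatic, same cost.


-- ===== PORT A =====
def letter_groups (keys : List Int) (text : String) : List String :=
  let cleaned : List Char := text.toList.filter PySem.Chars.isalpha
  let key : Int := PySem.List.pyGetD keys 0 0
  let groupings : List (List Char) := (PySem.List.pyRange 0 key 1).map (fun _ => [])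
  let final := (PySem.List.enumerate cleaned 0).foldl
    (fun gs p =>
      let group := PySem.Int.mod p.1 key
      PySem.List.pySetD gs group
        (PySem.List.pyGetD gs group [] ++ [PySem.List.pyGetD cleaned p.1 ' '])) groupings
  final.map (fun g => String.ofList g)

-- ===== PORT B =====
def letter_groups_alt (keys : List Int) (text : String) : List String :=
  let cleaned : List Char := text.toList.filter PySem.Chars.isalpha
  let key : Int := PySem.List.pyGetD keys 0 0
  (PySem.List.pyRange 0 key 1).map
    (fun g => String.ofList ((PySem.List.slice? cleaned (some g) none key).getD []))

-- ===== PRECONDITION & SPEC =====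
-- Pre_ excludes exactly the inputs where A raises: an empty keys list (IndexError on keys[0]),
-- and a first key ≤ 0 together with a text containing a letter (ZeroDivisionError for key 0,
-- IndexError for a negative key).
def Pre_letter_groups (keys : List Int) (text : String) : Prop :=
  keys ≠ [] ∧ (0 < keys.headD 0 ∨ ∀ c ∈ text.toList, PySem.Chars.isalpha c = false)
instance (keys : List Int) (text : String) : Decidable (Pre_letter_groups keys text) := by
  unfold Pre_letter_groups; infer_instance
def pvWitness_letter_groups : List Int × String := ([3], "Attack At Dawn!")

def Spec_letter_groups (keys : List Int) (text : String) (out : List String) : Prop :=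
  out = letter_groups_alt keys text
instance (keys : List Int) (text : String) (out : List String) : Decidable (Spec_letter_groups keys text out) := by
  unfold Spec_letter_groups; infer_instance

-- ===== CLAIM (what is proved, stated in full; the proofs are below) =====
def Claim_equal_letter_groups : Prop := ∀ (keys : List Int) (text : String),
  Dom_letter_groups keys text → Pre_letter_groups keys text →
  Spec_letter_groups keys text (letter_groups keys text)
-- ===== LEMMAS AND PROOFS =====

-- chars of l at positions p with (r + p) % K = j (r is the class of the current head), structurally in l
def pickO (K : Nat) : List Char → Nat → Nat → List Char
  | [], _, _ => []
  | c :: t, r, j => (if r = j then [c] else []) ++ pickO K t (if r + 1 = K then 0 else r + 1) j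

-- every K-th char of l, starting with the first
def strideAux (K : Nat) : List Char → List Char
  | [] => []
  | c :: t => c :: strideAux K (t.drop (K - 1))
termination_by l => l.length
decreasing_by simp

-- distance from class r to class j, going forward mod K
def dOf (K r j : Nat) : Nat := if r ≤ j then j - r else j + K - r

theorem mod_toNat_lt (K : Nat) (hK : 0 < K) (s : Int) :
    (PySem.Int.mod s (K : Int)).toNat < K := by
  have h := PySem.Int.mod_lt s (b := (K : Int)) (by exact_mod_cast hK)
  have h0 := PySem.Int.mod_nonneg s (b := (K : Int)) (by exact_mod_cast hK)
  omega

theorem modstep (K : Nat) (hK : 0 < K) (s : Int) :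
    (PySem.Int.mod (s + 1) (K : Int)).toNat =
      (if (PySem.Int.mod s (K : Int)).toNat + 1 = K then 0
       else (PySem.Int.mod s (K : Int)).toNat + 1) := by
  have hKi : (0 : Int) < (K : Int) := by exact_mod_cast hK
  rw [PySem.Int.mod_eq_emod_of_pos hKi, PySem.Int.mod_eq_emod_of_pos hKi]
  have ha0 : 0 ≤ s % (K : Int) := Int.emod_nonneg s (by omega)
  have haK : s % (K : Int) < (K : Int) := Int.emod_lt_of_pos s hKi
  have h2 : (s + 1) % (K : Int) = (s % (K : Int) + 1) % (K : Int) := by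
    conv_lhs => rw [Int.add_emod]
    conv_rhs => rw [Int.add_emod, Int.emod_emod_of_dvd _ (dvd_refl _)]
  rw [h2]
  by_cases hc : s % (K : Int) + 1 < (K : Int)
  · rw [Int.emod_eq_of_lt (by omega) hc]; split_ifs <;> omega
  · have h3 : s % (K : Int) + 1 = (K : Int) := by omega
    rw [h3, Int.emod_self]; split_ifs <;> omega

theorem foldA (K : Nat) (hK : 0 < K) : ∀ (t : List Char) (s : Int) (gs : List (List Char)),
    gs.length = K →
    (PySem.List.enumerate t s).foldl
      (fun gs p => PySem.List.pySetD gs (PySem.Int.mod p.1 (K : Int))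
        (PySem.List.pyGetD gs (PySem.Int.mod p.1 (K : Int)) [] ++ [p.2])) gs
    = gs.mapIdx (fun j g => g ++ pickO K t ((PySem.Int.mod s (K : Int)).toNat) j)
  | [], s, gs, h => by
      simp [PySem.List.enumerate_nil, pickO, List.mapIdx_eq_zipIdx_map]
  | c :: t, s, gs, h => by
      have hlt := mod_toNat_lt K hK s
      have h0 := PySem.Int.mod_nonneg s (b := (K : Int)) (by positivity)
      obtain ⟨r, hr⟩ : ∃ r : Nat, PySem.Int.mod s (K : Int) = (r : Int) :=
        ⟨(PySem.Int.mod s (K : Int)).toNat, by omega⟩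
      have hrK : r < K := by rw [hr] at hlt; simpa using hlt
      have hmodstep := modstep K hK s
      rw [hr] at hmodstep
      simp only [Int.toNat_natCast] at hmodstep
      rw [PySem.List.enumerate_cons, List.foldl_cons]
      simp only [hr, PySem.List.pySetD_natCast, PySem.List.pyGetD_natCast]
      rw [foldA K hK t (s + 1) _ (by simp [h]), hmodstep]
      apply List.ext_getElem
      · simp [h]
      · intro j hj1 hj2
        simp only [List.getElem_mapIdx, List.getElem_set, pickO, Int.toNat_natCast]
        by_cases hrj : r = j
        · subst hrj
          rw [if_pos rfl, if_pos rfl,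
            List.getD_eq_getElem gs [] (by simp at hj1; omega)]
          simp
        · rw [if_neg hrj, if_neg hrj]
          simp

theorem pick_stride (K : Nat) (hK : 0 < K) : ∀ (l : List Char) (r j : Nat), r < K → j < K →
    pickO K l r j = strideAux K (l.drop (dOf K r j))
  | [], r, j, hr, hj => by simp [pickO, strideAux]
  | c :: l, r, j, hr, hj => by
      have hr' : (if r + 1 = K then 0 else r + 1) < K := by split_ifs <;> omega
      have ih := pick_stride K hK l (if r + 1 = K then 0 else r + 1) j hr' hj
      by_cases hrj : r = j
      · subst hrj
        have hd1 : dOf K (if r + 1 = K then 0 else r + 1) r = K - 1 := by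
          simp only [dOf]; split_ifs <;> omega
        rw [hd1] at ih
        simp only [pickO, dOf, if_pos (le_refl r), Nat.sub_self,
          List.drop_zero, strideAux, ih]
        simp
      · have hdpos : 1 ≤ dOf K r j := by simp only [dOf]; split_ifs <;> omega
        have hstep : dOf K (if r + 1 = K then 0 else r + 1) j = dOf K r j - 1 := by
          simp only [dOf]; split_ifs <;> omega
        obtain ⟨e, he⟩ : ∃ e, dOf K r j = e + 1 := ⟨dOf K r j - 1, by omega⟩
        rw [hstep, he] at ih
        simp only [Nat.add_sub_cancel] at ih
        simp only [pickO, if_neg hrj, List.nil_append, ih, he, List.drop_succ_cons]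

theorem strideS (K : Nat) (hK : 0 < K) : ∀ (n : Nat) (u : List Char), u.length ≤ n →
    (List.range ((u.length + K - 1) / K)).filterMap (fun m => u[K * m]?) = strideAux K u := by
  intro n
  induction n with
  | zero =>
      intro u hu
      have hu0 : u = [] := by cases u <;> simp_all
      subst hu0
      simp [strideAux]
  | succ n ih =>
      intro u hu
      cases u with
      | nil => simp [strideAux]
      | cons c t =>
          have hq : ((c :: t).length + K - 1) / K = t.length / K + 1 := by
            simp only [List.length_cons]
            have h1 : t.length + 1 + K - 1 = t.length + K := by omega
            rw [h1, Nat.add_div_right _ hK]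
          rw [hq, List.range_succ_eq_map, List.filterMap_cons]
          simp only [Nat.mul_zero, List.getElem?_cons_zero]
          rw [List.filterMap_map]
          have hfun : ∀ m : Nat, ((fun m => (c :: t)[K * m]?) ∘ Nat.succ) m
              = (t.drop (K - 1))[K * m]? := by
            intro m
            have h2 : K * Nat.succ m = (K - 1 + K * m) + 1 := by
              rw [Nat.mul_succ]; omega
            simp only [Function.comp_apply, h2, List.getElem?_cons_succ, List.getElem?_drop]
          rw [List.filterMap_congr (fun m _ => hfun m)]
          have hcnt : t.length / K = ((t.drop (K - 1)).length + K - 1) / K := by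
            rw [List.length_drop]
            by_cases hle : t.length ≤ K - 1
            · rw [Nat.div_eq_of_lt (by omega), Nat.div_eq_of_lt (by omega)]
            · congr 1; omega
          rw [hcnt, ih (t.drop (K - 1)) (by rw [List.length_drop]; simp only [List.length_cons] at hu; omega)]
          simp [strideAux]

theorem slice_stride (K : Nat) (hK : 0 < K) (l : List Char) (g : Nat) :
    (PySem.List.slice? l (some (g : Int)) none (K : Int)).getD [] = strideAux K (l.drop g) := by
  simp only [PySem.List.slice?, PySem.List.sliceIndices]
  rw [if_neg (by omega : ¬((K : Int) = 0))]
  rw [if_neg (by omega : ¬((K : Int) < 0)), if_neg (by omega : ¬((K : Int) < 0)),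
      if_neg (by omega : ¬((K : Int) < 0)), if_neg (by omega : ¬((g : Int) < 0)),
      if_pos (by omega : (0 : Int) < (K : Int))]
  rw [Option.getD_some]
  by_cases hg : g < l.length
  · rw [min_eq_left (by exact_mod_cast Nat.le_of_lt hg)]
    rw [if_pos (by exact_mod_cast hg)]
    have hcnt : (((l.length : Int) - (g : Int) + (K : Int) - 1) / (K : Int)).toNat
        = ((l.drop g).length + K - 1) / K := by
      rw [List.length_drop]
      have h1 : ((l.length : Int) - (g : Int) + (K : Int) - 1)
          = ((l.length - g + K - 1 : Nat) : Int) := by omega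
      rw [h1, ← Int.natCast_ediv, Int.toNat_natCast]
    rw [hcnt]
    rw [List.filterMap_congr (fun x _ => by
      have h2 : (((g : Int)) + (K : Int) * (x : Int)).toNat = g + K * x := by
        omega
      rw [h2, ← List.getElem?_drop])]
    exact strideS K hK (l.drop g).length (l.drop g) le_rfl
  · rw [min_eq_right (by exact_mod_cast Nat.le_of_not_lt hg)]
    rw [if_neg (lt_irrefl _)]
    simp [List.drop_eq_nil_of_le (Nat.le_of_not_lt hg), strideAux]

-- ===== VERDICT (by name: the statement is the Claim_ definition above) =====
theorem letter_groups_spec : Claim_equal_letter_groups := by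
  intro keys text _ hpre
  obtain ⟨hne, hkey⟩ := hpre
  have hkeyD : PySem.List.pyGetD keys 0 0 = keys.headD 0 := by
    cases keys with
    | nil => exact absurd rfl hne
    | cons a t => simp [PySem.List.pyGetD_zero_cons]
  unfold Spec_letter_groups letter_groups letter_groups_alt
  simp only []
  by_cases hpos : 0 < keys.headD 0
  · -- positive key: both sides are the K groups, group j = cleaned[j::K]
    set cleaned : List Char := text.toList.filter PySem.Chars.isalpha with hcl
    obtain ⟨K, hK, hKkey⟩ : ∃ K : Nat, 0 < K ∧ PySem.List.pyGetD keys 0 0 = (K : Int) :=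
      ⟨(keys.headD 0).toNat, by omega, by omega⟩
    rw [hKkey]
    have hbody : ∀ (init : List (List Char)),
        (PySem.List.enumerate cleaned 0).foldl
          (fun gs p => PySem.List.pySetD gs (PySem.Int.mod p.1 (K : Int))
            (PySem.List.pyGetD gs (PySem.Int.mod p.1 (K : Int)) []
              ++ [PySem.List.pyGetD cleaned p.1 ' '])) init
        = (PySem.List.enumerate cleaned 0).foldl
          (fun gs p => PySem.List.pySetD gs (PySem.Int.mod p.1 (K : Int))
            (PySem.List.pyGetD gs (PySem.Int.mod p.1 (K : Int)) [] ++ [p.2])) init := by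
      intro init
      apply PySem.List.foldl_congr_mem
      intro acc p hp
      obtain ⟨k, hk, rfl⟩ := (PySem.List.mem_enumerate_iff _ _ _).mp hp
      simp [PySem.List.pyGetD_natCast, List.getElem?_eq_getElem hk]
    rw [hbody]
    have hinitlen : ((PySem.List.pyRange 0 (K : Int) 1).map
        (fun _ => ([] : List Char))).length = K := by
      simp [PySem.List.pyRange_zero_natCast]
    rw [foldA K hK cleaned 0 _ hinitlen]
    have hm0 : (PySem.Int.mod 0 (K : Int)).toNat = 0 := by
      rw [PySem.Int.mod_eq_emod_of_pos (by omega)]; simp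
    rw [hm0]
    apply List.ext_getElem
    · simp [PySem.List.pyRange_zero_natCast]
    · intro j hj1 hj2
      have hjK : j < K := by
        simpa [PySem.List.pyRange_zero_natCast] using hj2
      simp only [PySem.List.pyRange_zero_natCast] at hj1 hj2 ⊢
      simp only [List.getElem_map, List.getElem_mapIdx, List.getElem_range]
      rw [slice_stride K hK cleaned j, pick_stride K hK cleaned 0 j hK hjK]
      simp [dOf]
  · -- key ≤ 0 and (by Pre_) no letter in the text: both sides are []
    have hnoalpha : ∀ c ∈ text.toList, PySem.Chars.isalpha c = false := by
      rcases hkey with h | h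
      · exact absurd h hpos
      · exact h
    have hcl : text.toList.filter PySem.Chars.isalpha = [] :=
      List.filter_eq_nil_iff.mpr (by intro c hc; simp [hnoalpha c hc])
    have hrange : PySem.List.pyRange 0 (PySem.List.pyGetD keys 0 0) 1 = [] := by
      simp only [PySem.List.pyRange, if_neg (by omega : ¬(1 : Int) = 0)]
      rw [if_pos (by omega : (0:Int) < 1), if_neg (by omega : ¬(0:Int) < PySem.List.pyGetD keys 0 0)]
      simp
    rw [hcl, hrange]
    simp [PySem.List.enumerate_nil]
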